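-- pv_equiv track=rewrite | github.com/igrinspan/fuzz4pa | app/modules/contract_creation.py | find_contract_end_line
-- ===== SOURCE A (Python) =====
-- def find_contract_start_line(contract_lines, contract_name):
--     for idx, line in enumerate(contract_lines):
--         if f"contract {contract_name}" in line and not is_a_comment(line):
--             return idx
--
-- def find_contract_end_line(contract_lines, contract_name):
--     inside_function = False
--     bracket_count = 0
--     start_position = find_contract_start_line(contract_lines, contract_name)
--
--     for idx, line in enumerate(contract_lines):
--         if idx == start_position:
--             bracket_count = 1
--             inside_function = True
--             continue
--
--         if inside_function and "{" in line and not is_a_comment(line):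
--             bracket_count += 1
--         if inside_function and "}" in line and not is_a_comment(line):
--             bracket_count -= 1
--         if inside_function and bracket_count == 0:
--             return idx
--
--     return -1
--
-- def is_a_comment(line):
--     return any(line.strip().startswith(prefix) for prefix in ["//", "/*", "*", "*/"])
-- ===== SOURCE B (Python) =====
-- def is_a_comment(line):
--     return any(line.strip().startswith(prefix) for prefix in ["//", "/*", "*", "*/"])
--
--
-- def find_contract_start_line(contract_lines, contract_name):
--     for idx, line in enumerate(contract_lines):
--         if f"contract {contract_name}" in line and not is_a_comment(line):
--             return idx
--
--
-- def line_delta(line):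
--     if is_a_comment(line):
--         return 0
--     return ("{" in line) - ("}" in line)
--
--
-- def match_close(lines):
--     # Recursive-descent matcher: given the lines following an already-open
--     # brace, return the offset of the line that closes it, or None.
--     # A net-opening line opens a nested block: recurse to skip it whole and
--     # resume just after its close; a net-closing line closes our block.
--     i = 0
--     while i < len(lines):
--         d = line_delta(lines[i])
--         if d == -1:
--             return i
--         if d == 1:
--             j = match_close(lines[i + 1:])   # close of the nested block
--             if j is None:
--                 return None
--             i = i + 1 + j + 1                # resume after the nested block
--         else:
--             i += 1
--     return None
--
--
-- def find_contract_end_line(contract_lines, contract_name):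
--     start = find_contract_start_line(contract_lines, contract_name)
--     if start is None:
--         return -1
--     j = match_close(contract_lines[start + 1:])
--     return -1 if j is None else start + 1 + j
-- ===== Notes on version B (the rewrite author's own statement) =====
-- stated objective: alternative
-- what changed: Replaces A's single stateful scan with an inside-flag and a mutable bracket counter by a recursive-descent matcher that mirrors the block structure: on a net-opening line it recurses to skip the whole nested block and resumes after it, on a net-closing line it returns, so no depth counter is ever maintained.
import Mathlib
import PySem

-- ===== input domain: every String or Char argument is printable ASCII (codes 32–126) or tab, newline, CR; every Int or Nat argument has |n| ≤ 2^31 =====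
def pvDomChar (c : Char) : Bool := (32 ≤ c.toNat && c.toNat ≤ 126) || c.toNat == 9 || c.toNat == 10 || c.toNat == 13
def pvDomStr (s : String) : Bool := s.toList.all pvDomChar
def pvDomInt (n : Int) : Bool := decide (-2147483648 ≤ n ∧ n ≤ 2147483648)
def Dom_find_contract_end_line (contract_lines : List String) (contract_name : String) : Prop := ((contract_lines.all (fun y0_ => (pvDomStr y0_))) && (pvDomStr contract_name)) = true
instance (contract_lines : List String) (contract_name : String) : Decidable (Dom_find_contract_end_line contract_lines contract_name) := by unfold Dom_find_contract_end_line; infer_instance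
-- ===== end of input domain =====

-- B replaces A's single stateful scan (inside-flag + mutable bracket counter) by a
-- recursive-descent matcher mirroring the block structure: a net-opening line makes it
-- recurse to skip the nested block whole and resume after its close; no depth counter is kept.

-- ===== PORT A =====
-- shared helper: is_a_comment(line)
def is_a_comment (line : String) : Bool :=
  ["//", "/*", "*", "*/"].any (fun p => PySem.Str.startswith (PySem.Str.strip line) p)

-- shared helper: find_contract_start_line; the f-string "contract {name}" is built on the
-- List Char side (exact: PySem.Str.isIn bridges to PySem.Chars.isIn on toList)
def fcsl_go (needle : List Char) : List (Int × String) → Option Int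
  | [] => none
  | (idx, line) :: rest =>
      if PySem.Chars.isIn needle line.toList && !is_a_comment line then some idx
      else fcsl_go needle rest

def find_contract_start_line (contract_lines : List String) (contract_name : String) : Option Int :=
  fcsl_go ("contract ".toList ++ contract_name.toList) (PySem.List.enumerate contract_lines 0)

-- A's for-loop with early return, state = (inside_function, bracket_count)
def fcel_go : List (Int × String) → Option Int → Bool → Int → Int
  | [], _, _, _ => -1
  | (idx, line) :: rest, start?, inside, count =>
      if start? == some idx then fcel_go rest start? true 1
      else
        let c1 := if inside && PySem.Str.isIn "{" line && !is_a_comment line then count + 1 else count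
        let c2 := if inside && PySem.Str.isIn "}" line && !is_a_comment line then c1 - 1 else c1
        if inside && c2 == 0 then idx else fcel_go rest start? inside c2

def find_contract_end_line (contract_lines : List String) (contract_name : String) : Int :=
  fcel_go (PySem.List.enumerate contract_lines 0)
    (find_contract_start_line contract_lines contract_name) false 0

-- ===== PORT B =====
-- Source B's line_delta
def line_delta (line : String) : Int :=
  if is_a_comment line then 0
  else (if PySem.Str.isIn "{" line then 1 else 0) - (if PySem.Str.isIn "}" line then 1 else 0)

-- Source B's match_close: its sequential while-walk (i += 1 / the jump i = i+1+j+1) becomes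
-- recursion on the suffix of lines (exact: offsets into the suffix); the nested-block
-- call match_close(lines[i+1:]) is the inner recursive call on rest.drop (j+1)'s prefix
def match_close : List String → Option Nat
  | [] => none
  | ln :: rest =>
      let d := line_delta ln
      if d == -1 then some 0
      else if d == 1 then
        match match_close rest with
        | none => none
        | some j => (match_close (rest.drop (j + 1))).map (fun k => 1 + j + 1 + k)
      else (match_close rest).map (fun k => 1 + k)
termination_by l => l.length
decreasing_by all_goals (simp [List.length_drop]; try omega)

def find_contract_end_line_alt (contract_lines : List String) (contract_name : String) : Int :=
  match find_contract_start_line contract_lines contract_name with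
  | none => -1
  | some start =>
      match match_close (PySem.List.slice contract_lines (some (start + 1)) none) with
      | none => -1
      | some j => start + 1 + (j : Int)

-- ===== PRECONDITION & SPEC =====
def Spec_find_contract_end_line (contract_lines : List String) (contract_name : String) (out : Int) : Prop := out = find_contract_end_line_alt contract_lines contract_name
instance (contract_lines : List String) (contract_name : String) (out : Int) : Decidable (Spec_find_contract_end_line contract_lines contract_name out) := by unfold Spec_find_contract_end_line; infer_instance

-- ===== CLAIM (what is proved, stated in full; the proofs are below) =====
def Claim_equal_find_contract_end_line : Prop := ∀ (contract_lines : List String) (contract_name : String), Dom_find_contract_end_line contract_lines contract_name → Spec_find_contract_end_line contract_lines contract_name (find_contract_end_line contract_lines contract_name)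

-- ===== LEMMAS AND PROOFS =====

-- running-depth list of A's counter starting at c (proof-only characterisation)
def sumsFrom (c : Int) : List Int → List Int
  | [] => []
  | x :: t => (c + x) :: sumsFrom (c + x) t

-- A's loop never finds a start: stays outside forever
lemma fcel_none (pairs : List (Int × String)) : ∀ c, fcel_go pairs none false c = -1 := by
  induction pairs with
  | nil => intro c; rfl
  | cons p rest ih =>
      intro c
      obtain ⟨idx, line⟩ := p
      simp [fcel_go, ih]

-- lines before the start line do nothing
lemma fcel_skip (pairs : List (Int × String)) : ∀ (rest : List (Int × String)) (s c : Int),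
    (∀ p ∈ pairs, p.1 ≠ s) →
    fcel_go (pairs ++ rest) (some s) false c = fcel_go rest (some s) false c := by
  induction pairs with
  | nil => intro rest s c _; rfl
  | cons p pre ih =>
      intro rest s c h
      obtain ⟨idx, line⟩ := p
      have hne : idx ≠ s := h (idx, line) (by simp)
      simp [fcel_go, Ne.symm hne]
      exact ih rest s c (fun q hq => h q (by simp [hq]))

-- the two-if bracket update equals adding the line delta
lemma delta_step (line : String) (c : Int) :
    (if PySem.Str.isIn "}" line && !is_a_comment line then
        (if PySem.Str.isIn "{" line && !is_a_comment line then c + 1 else c) - 1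
      else (if PySem.Str.isIn "{" line && !is_a_comment line then c + 1 else c))
      = c + line_delta line := by
  unfold line_delta
  cases h1 : is_a_comment line <;> cases h2 : PySem.Str.isIn "{" line <;>
    cases h3 : PySem.Str.isIn "}" line <;> (simp; try omega)

-- after the start line, A's scan is "first zero of the running depths"
lemma fcel_post (tail : List String) : ∀ (j s c : Int), s < j →
    fcel_go (PySem.List.enumerate tail j) (some s) true c =
      (match PySem.List.index? (sumsFrom c (tail.map line_delta)) (0 : Int) with
        | some k => j + (k : Int)
        | none => -1) := by
  induction tail with
  | nil => intro j s c _; simp [PySem.List.enumerate, fcel_go, sumsFrom, PySem.List.index?]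
  | cons line t ih =>
      intro j s c hlt
      rw [PySem.List.enumerate_cons]
      have hne : s ≠ j := by omega
      simp only [fcel_go, beq_iff_eq, Option.some.injEq, if_neg hne]
      simp only [Bool.true_and, List.map_cons, sumsFrom]
      rw [delta_step line c]
      by_cases hz : c + line_delta line = 0
      · rw [if_pos (by simp [hz]), hz, PySem.List.index?_cons_self]; simp
      · rw [if_neg (by simp [hz]), ih (j + 1) s (c + line_delta line) (by omega),
          PySem.List.index?_cons_of_ne _ hz]
        cases PySem.List.index? (sumsFrom (c + line_delta line) (t.map line_delta)) (0 : Int) with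
        | none => rfl
        | some k => simp only [Option.map_some]; push_cast; ring

-- a found start index decomposes the line list
lemma fcsl_go_some (needle : List Char) (cl : List String) : ∀ (j s : Int),
    fcsl_go needle (PySem.List.enumerate cl j) = some s →
    ∃ (pre : List String) (line : String) (t : List String),
      cl = pre ++ line :: t ∧ s = j + (pre.length : Int) := by
  induction cl with
  | nil => intro j s h; simp [PySem.List.enumerate, fcsl_go] at h
  | cons line t ih =>
      intro j s h
      rw [PySem.List.enumerate_cons] at h
      by_cases hc : (PySem.Chars.isIn needle line.toList && !is_a_comment line) = true
      · refine ⟨[], line, t, by simp, ?_⟩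
        simp [fcsl_go, hc] at h
        simp [h]
      · simp only [fcsl_go, hc] at h
        obtain ⟨pre, line', t', hcl, hs⟩ := ih (j + 1) s h
        exact ⟨line :: pre, line', t', by simp [hcl], by simp [hs]; omega⟩

-- ---- B-side: match_close = first zero of the running depths ----

lemma line_delta_bounds (ln : String) : -1 ≤ line_delta ln ∧ line_delta ln ≤ 1 := by
  unfold line_delta; split_ifs <;> omega

lemma sumsFrom_shift (u : List Int) : ∀ c, sumsFrom (c + 1) u = (sumsFrom c u).map (· + 1) := by
  induction u with
  | nil => intro c; simp [sumsFrom]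
  | cons x t ih =>
      intro c
      simp only [sumsFrom, List.map_cons]
      rw [show c + 1 + x = c + x + 1 by ring, ih]

lemma index?_map_add_one (l : List Int) (x : Int) :
    PySem.List.index? (l.map (· + 1)) (x + 1) = PySem.List.index? l x := by
  induction l with
  | nil => rfl
  | cons y t ih =>
      by_cases h : y = x
      · subst h; rw [List.map_cons, PySem.List.index?_cons_self, PySem.List.index?_cons_self]
      · rw [List.map_cons, PySem.List.index?_cons_of_ne _ (by omega),
          PySem.List.index?_cons_of_ne _ h, ih]

-- drop at the first zero: the first -1 of the depths comes after the first 0, and the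
-- walk restarts at 0 there (steps are ≥ -1, start ≥ 1: intermediate-value argument)
lemma first_neg_split (u : List Int) : ∀ c : Int, 1 ≤ c → (∀ d ∈ u, -1 ≤ d) →
    PySem.List.index? (sumsFrom c u) (-1) =
      (match PySem.List.index? (sumsFrom c u) (0 : Int) with
        | none => none
        | some j => (PySem.List.index? (sumsFrom 0 (u.drop (j + 1))) (-1)).map (fun k => j + 1 + k)) := by
  induction u with
  | nil => intro c _ _; simp [sumsFrom, PySem.List.index?]
  | cons d t ih =>
      intro c hc hb
      have hd : -1 ≤ d := hb d (by simp)
      have hbt : ∀ x ∈ t, -1 ≤ x := fun x hx => hb x (by simp [hx])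
      simp only [sumsFrom]
      by_cases h0 : c + d = 0
      · rw [PySem.List.index?_cons_of_ne _ (by omega), h0, PySem.List.index?_cons_self]
        simp only [List.drop_succ_cons, List.drop_zero]
        cases PySem.List.index? (sumsFrom 0 t) (-1) with
        | none => rfl
        | some k => simp; omega
      · have hge : 1 ≤ c + d := by omega
        rw [PySem.List.index?_cons_of_ne _ (by omega), PySem.List.index?_cons_of_ne _ h0,
          ih (c + d) hge hbt]
        cases hj : PySem.List.index? (sumsFrom (c + d) t) (0 : Int) with
        | none => simp
        | some j =>
            simp only [List.drop_succ_cons, Option.map_map, Option.map_some]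
            cases PySem.List.index? (sumsFrom 0 (t.drop (j + 1))) (-1) with
            | none => simp
            | some k => simp [Function.comp]; omega

lemma match_close_eq (n : Nat) : ∀ (lines : List String), lines.length ≤ n →
    match_close lines = PySem.List.index? (sumsFrom 1 (lines.map line_delta)) (0 : Int) := by
  induction n with
  | zero =>
      intro lines h
      have hnil : lines = [] := List.length_eq_zero_iff.mp (by omega)
      subst hnil
      simp [match_close, sumsFrom, PySem.List.index?]
  | succ n ih =>
      intro lines hlen
      cases lines with
      | nil => simp [match_close, sumsFrom, PySem.List.index?]
      | cons ln rest =>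
          have hrest : rest.length ≤ n := by simp at hlen; omega
          obtain ⟨hlo, hhi⟩ := line_delta_bounds ln
          rw [match_close]
          simp only [List.map_cons, sumsFrom]
          by_cases hm1 : line_delta ln = -1
          · rw [if_pos (by simp [hm1]), hm1]
            rw [show (1 : Int) + -1 = 0 by norm_num, PySem.List.index?_cons_self]
          · by_cases hp1 : line_delta ln = 1
            · rw [if_neg (by simp [hm1]), if_pos (by simp [hp1]), hp1]
              rw [PySem.List.index?_cons_of_ne _ (by omega)]
              have hneg : PySem.List.index? (sumsFrom (1 + 1) (rest.map line_delta)) (0 : Int)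
                  = PySem.List.index? (sumsFrom 1 (rest.map line_delta)) (-1) := by
                rw [sumsFrom_shift (rest.map line_delta) 1]
                exact index?_map_add_one (sumsFrom 1 (rest.map line_delta)) (-1)
              rw [hneg, first_neg_split (rest.map line_delta) 1 (by norm_num)
                (by intro d hd; obtain ⟨x, _, rfl⟩ := List.mem_map.mp hd; exact (line_delta_bounds x).1)]
              rw [ih rest hrest]
              cases hj : PySem.List.index? (sumsFrom 1 (rest.map line_delta)) (0 : Int) with
              | none => simp
              | some j =>
                  simp only
                  have hdropped : (rest.map line_delta).drop (j + 1) = (rest.drop (j + 1)).map line_delta := by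
                    rw [List.map_drop]
                  rw [hdropped]
                  have hz : PySem.List.index? (sumsFrom 0 ((rest.drop (j + 1)).map line_delta)) (-1)
                      = PySem.List.index? (sumsFrom 1 ((rest.drop (j + 1)).map line_delta)) (0 : Int) := by
                    have h2 : sumsFrom 1 ((rest.drop (j + 1)).map line_delta)
                        = (sumsFrom 0 ((rest.drop (j + 1)).map line_delta)).map (· + 1) :=
                      sumsFrom_shift ((rest.drop (j + 1)).map line_delta) 0
                    rw [h2]
                    exact (index?_map_add_one (sumsFrom 0 ((rest.drop (j + 1)).map line_delta)) (-1)).symm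
                  rw [hz, ih (rest.drop (j + 1)) (by simp [List.length_drop]; omega)]
                  cases PySem.List.index? (sumsFrom 1 ((rest.drop (j + 1)).map line_delta)) (0 : Int) with
                  | none => simp
                  | some k => simp; omega
            · have h0 : line_delta ln = 0 := by omega
              rw [if_neg (by simp [hm1]), if_neg (by simp [hp1]), h0]
              rw [PySem.List.index?_cons_of_ne _ (by omega), ih rest hrest]
              rw [show (1 : Int) + 0 = 1 by norm_num]
              cases PySem.List.index? (sumsFrom 1 (rest.map line_delta)) (0 : Int) with
              | none => rfl
              | some k => simp; omega

-- ===== VERDICT (by name: the statement is the Claim_ definition above) =====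
theorem find_contract_end_line_spec : Claim_equal_find_contract_end_line := by
  intro cl cn _
  unfold Spec_find_contract_end_line find_contract_end_line find_contract_end_line_alt
  cases hstart : find_contract_start_line cl cn with
  | none => simp [fcel_none]
  | some s =>
      obtain ⟨pre, line, t, hcl, hs⟩ := fcsl_go_some _ cl 0 s hstart
      have hs' : s = (pre.length : Int) := by omega
      subst hcl
      rw [PySem.List.enumerate_append]
      rw [fcel_skip _ _ s 0 (by
        intro p hp
        rw [PySem.List.mem_enumerate_iff] at hp
        obtain ⟨k, hk, rfl⟩ := hp
        simp [hs']; omega)]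
      rw [PySem.List.enumerate_cons]
      have hself : (some s == some (0 + (pre.length : Int))) = true := by simp [hs']
      simp only [fcel_go]
      rw [if_pos hself]
      rw [fcel_post t (0 + (pre.length : Int) + 1) s 1 (by omega)]
      have hslice : PySem.List.slice (pre ++ line :: t) (some (s + 1)) none = t := by
        have : s + 1 = ((pre.length + 1 : Nat) : Int) := by rw [hs']; push_cast; ring
        rw [this, PySem.List.slice_from_natCast]
        rw [show pre ++ line :: t = (pre ++ [line]) ++ t by simp]
        rw [show pre.length + 1 = (pre ++ [line]).length by simp, List.drop_left]
      rw [hslice, match_close_eq t.length t (le_refl _)]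
      cases PySem.List.index? (sumsFrom 1 (t.map line_delta)) (0 : Int) with
      | none => rfl
      | some k => simp [hs']
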